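-- pv_equiv track=rewrite | github.com/pypi-data/pypi-mirror-390 | packages/blue-platform/blue_platform-1.0-py3-none-any.whl/blue/operators/delete_operator.py | _delete_multiple_positions
-- ===== SOURCE A (Python) =====
-- from typing import List, Dict, Any, Callable, Union
--
-- def _normalize_index(idx: int, length: int) -> int:
--     """Convert negative index to positive, return None if out of bounds."""
--     if idx < 0:
--         idx = length + idx
--     if idx < 0 or idx >= length:
--         return None
--     return idx
--
-- def _delete_multiple_positions(base_data: List[Dict[str, Any]], delete_indices: List[int]) -> List[Dict[str, Any]]:
--     """Delete multiple positions efficiently."""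
--     base_len = len(base_data)
--
--     # Normalize indices and filter valid ones
--     valid_indices = set()
--     for idx in delete_indices:
--         normalized = _normalize_index(idx, base_len)
--         if normalized is not None:
--             valid_indices.add(normalized)
--
--     # Build result by skipping deleted positions
--     result = []
--     for i, record in enumerate(base_data):
--         if i not in valid_indices:
--             result.append(record)
--
--     return result
-- ===== SOURCE B (Python) =====
-- def _delete_multiple_positions(base_data, delete_indices):
--     n = len(base_data)
--     cuts = sorted({i + n if i < 0 else i for i in delete_indices if -n <= i < n})
--     out = []
--     prev = -1
--     for c in cuts:
--         out.extend(base_data[prev + 1:c])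
--         prev = c
--     out.extend(base_data[prev + 1:])
--     return out
-- ===== Notes on version B (the rewrite author's own statement) =====
-- stated objective: alternative
-- what changed: B normalizes the delete indices into a sorted deduplicated list of cut points and builds the result by concatenating the slices between consecutive cuts, instead of A's per-element set-membership filter over an enumeration.
import Mathlib
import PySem

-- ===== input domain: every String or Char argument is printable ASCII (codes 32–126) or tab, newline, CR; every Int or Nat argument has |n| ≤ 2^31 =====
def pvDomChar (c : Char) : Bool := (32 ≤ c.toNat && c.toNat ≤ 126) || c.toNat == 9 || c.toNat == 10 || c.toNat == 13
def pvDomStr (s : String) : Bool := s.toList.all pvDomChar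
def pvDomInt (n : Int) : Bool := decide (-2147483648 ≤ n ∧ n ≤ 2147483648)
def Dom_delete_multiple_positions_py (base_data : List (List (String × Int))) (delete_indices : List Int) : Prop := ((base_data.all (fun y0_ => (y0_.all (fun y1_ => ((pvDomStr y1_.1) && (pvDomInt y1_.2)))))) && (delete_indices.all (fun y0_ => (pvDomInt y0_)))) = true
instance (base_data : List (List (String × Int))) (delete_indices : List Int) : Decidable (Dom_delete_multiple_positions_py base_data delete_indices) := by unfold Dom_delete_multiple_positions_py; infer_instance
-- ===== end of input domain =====

-- B builds the survivors by concatenating slices between sorted deduplicated cut points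
-- instead of A's per-element set-membership filter (alternative decomposition, same cost class).

-- ===== PORT A =====
def normalize_index_py (idx length : Int) : Option Int :=
  let idx1 := if idx < 0 then length + idx else idx
  if idx1 < 0 ∨ length ≤ idx1 then none else some idx1

def delete_multiple_positions_py (base_data : List (List (String × Int))) (delete_indices : List Int) : List (List (String × Int)) :=
  let base_len : Int := base_data.length
  let valid : PySem.Set Int := delete_indices.foldl (fun s idx =>
      match normalize_index_py idx base_len with
      | some v => PySem.Set.add s v
      | none => s) PySem.Set.empty
  (PySem.List.enumerate base_data 0).foldl (fun res p =>
      if valid.contains p.1 then res else res ++ [p.2]) []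

-- ===== PORT B =====
def delete_multiple_positions_py_alt (base_data : List (List (String × Int))) (delete_indices : List Int) : List (List (String × Int)) :=
  let n : Int := base_data.length
  let cuts : List Int := PySem.List.sorted (PySem.Set.ofList
      ((delete_indices.filter (fun i => decide (-n ≤ i) && decide (i < n))).map
        (fun i => if i < 0 then i + n else i))) (fun x => x) false
  let fin := cuts.foldl (fun (acc : List (List (String × Int)) × Int) c =>
      (acc.1 ++ PySem.List.slice base_data (some (acc.2 + 1)) (some c), c)) ([], -1)
  fin.1 ++ PySem.List.slice base_data (some (fin.2 + 1)) none

-- ===== PRECONDITION & SPEC =====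
def Spec_delete_multiple_positions_py (base_data : List (List (String × Int))) (delete_indices : List Int) (out : List (List (String × Int))) : Prop := out = delete_multiple_positions_py_alt base_data delete_indices
instance (base_data : List (List (String × Int))) (delete_indices : List Int) (out : List (List (String × Int))) : Decidable (Spec_delete_multiple_positions_py base_data delete_indices out) := by unfold Spec_delete_multiple_positions_py; infer_instance

-- ===== CLAIM (what is proved, stated in full; the proofs are below) =====
def Claim_equal_delete_multiple_positions_py : Prop := ∀ (base_data : List (List (String × Int))) (delete_indices : List Int), Dom_delete_multiple_positions_py base_data delete_indices → Spec_delete_multiple_positions_py base_data delete_indices (delete_multiple_positions_py base_data delete_indices)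

-- ===== LEMMAS AND PROOFS =====

-- B's slice walk as a structural recursion over the cut points.
def pvWalk (bd : List (List (String × Int))) (prev : Int) : List Int → List (List (String × Int))
  | [] => PySem.List.slice bd (some (prev + 1)) none
  | c :: cs => PySem.List.slice bd (some (prev + 1)) (some c) ++ pvWalk bd c cs

theorem pvWalk_fold (bd : List (List (String × Int))) :
    ∀ (cuts : List Int) (acc : List (List (String × Int))) (prev : Int),
      (cuts.foldl (fun (a : List (List (String × Int)) × Int) c =>
          (a.1 ++ PySem.List.slice bd (some (a.2 + 1)) (some c), c)) (acc, prev)).1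
        ++ PySem.List.slice bd
            (some ((cuts.foldl (fun (a : List (List (String × Int)) × Int) c =>
              (a.1 ++ PySem.List.slice bd (some (a.2 + 1)) (some c), c)) (acc, prev)).2 + 1)) none
      = acc ++ pvWalk bd prev cuts := by
  intro cuts
  induction cuts with
  | nil => intro acc prev; simp [pvWalk]
  | cons c cs ih =>
      intro acc prev
      simp only [List.foldl_cons, pvWalk]
      rw [ih]
      simp [List.append_assoc]

theorem pvWalk_eq :
    ∀ (cuts : List Int) (bd : List (List (String × Int))) (j : Nat),
      cuts.Pairwise (· < ·) → (∀ c ∈ cuts, (j : Int) ≤ c ∧ c < (bd.length : Int)) →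
      pvWalk bd ((j : Int) - 1) cuts
        = ((PySem.List.enumerate (bd.drop j) (j : Int)).filter
            (fun p => !(cuts.contains p.1))).map (·.2) := by
  intro cuts
  induction cuts with
  | nil =>
      intro bd j _ _
      have h1 : ((j : Int) - 1) + 1 = ((j : Nat) : Int) := by omega
      simp [pvWalk, h1, PySem.List.slice_from_natCast, List.filter_eq_self.mpr,
        PySem.List.map_snd_enumerate]
  | cons c cs ih =>
      intro bd j hpair hbnd
      obtain ⟨hpc, hpcs⟩ := List.pairwise_cons.mp hpair
      obtain ⟨hjc, hcn⟩ := hbnd c (by simp)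
      -- c is a natural index k with j ≤ k < bd.length
      obtain ⟨k, rfl⟩ : ∃ k : Nat, c = (k : Int) :=
        ⟨c.toNat, by omega⟩
      have hjk : j ≤ k := by exact_mod_cast hjc
      have hkn : k < bd.length := by exact_mod_cast hcn
      have h1 : ((j : Int) - 1) + 1 = ((j : Nat) : Int) := by omega
      -- split bd.drop j at position k
      have hsplit : bd.drop j
          = (bd.drop j).take (k - j) ++ bd[k] :: bd.drop (k + 1) := by
        conv_lhs => rw [← List.take_append_drop (k - j) (bd.drop j)]
        congr 1
        rw [List.drop_drop]
        have h4 : j + (k - j) = k := by omega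
        rw [h4, List.drop_eq_getElem_cons hkn]
      have hlen : ((bd.drop j).take (k - j)).length = k - j := by
        simp; omega
      -- enumerate over the split
      have henum : PySem.List.enumerate (bd.drop j) (j : Int)
          = PySem.List.enumerate ((bd.drop j).take (k - j)) (j : Int)
            ++ ((k : Int), bd[k]) :: PySem.List.enumerate (bd.drop (k + 1)) ((k : Int) + 1) := by
        conv_lhs => rw [hsplit]
        rw [PySem.List.enumerate_append]
        rw [hlen]
        have h5 : (j : Int) + ((k - j : Nat) : Int) = (k : Int) := by omega
        rw [h5, PySem.List.enumerate_cons]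
      -- the prefix is entirely kept
      have hpre : (PySem.List.enumerate ((bd.drop j).take (k - j)) (j : Int)).filter
            (fun p => !(((k : Int) :: cs).contains p.1))
          = PySem.List.enumerate ((bd.drop j).take (k - j)) (j : Int) := by
        apply List.filter_eq_self.mpr
        intro p hp
        obtain ⟨t, ht, rfl⟩ := (PySem.List.mem_enumerate_iff _ _ _).mp hp
        have htk : t < k - j := by omega
        have hlt : (j : Int) + (t : Nat) < (k : Int) := by omega
        simp only [List.contains_cons, Bool.not_eq_true', Bool.or_eq_false_iff]
        constructor
        · simp only [beq_eq_false_iff_ne, ne_eq]; omega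
        · rw [← Bool.not_eq_true, List.contains_iff_mem]
          intro hmem
          have := hpc _ hmem
          omega
      -- the element at k is dropped
      have hat : (!(((k : Int) :: cs).contains ((k : Int), bd[k]).1)) = false := by
        simp
      -- in the tail, membership in (k::cs) equals membership in cs
      have htail : (PySem.List.enumerate (bd.drop (k + 1)) ((k : Int) + 1)).filter
            (fun p => !(((k : Int) :: cs).contains p.1))
          = (PySem.List.enumerate (bd.drop (k + 1)) ((k : Int) + 1)).filter
            (fun p => !(cs.contains p.1)) := by
        apply List.filter_congr
        intro p hp
        obtain ⟨t, ht, rfl⟩ := (PySem.List.mem_enumerate_iff _ _ _).mp hp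
        simp only [List.contains_cons]
        have : ((((k : Int) + 1 + (t : Nat), (bd.drop (k + 1))[t]).1 == (k : Int)) : Bool) = false := by
          simp only [beq_eq_false_iff_ne, ne_eq]
          omega
        rw [this]; simp
      -- assemble
      have hIH := ih (bd := bd) (j := k + 1) hpcs
        (by
          intro c' hc'
          obtain ⟨h1', h2'⟩ := hbnd c' (by simp [hc'])
          have := hpc c' hc'
          constructor
          · push_cast; omega
          · exact h2')
      have hk1 : (((k + 1 : Nat) : Int) - 1) = (k : Int) := by push_cast; omega
      rw [hk1] at hIH
      show PySem.List.slice bd (some (((j : Int) - 1) + 1)) (some (k : Int)) ++ pvWalk bd (k : Int) cs = _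
      rw [henum, List.filter_append, hpre]
      simp only [List.filter_cons]
      rw [hat, htail]
      simp only [Bool.false_eq_true, if_false]
      rw [List.map_append, h1, PySem.List.slice_natCast]
      have h3 : (PySem.List.enumerate ((bd.drop j).take (k - j)) (j : Int)).map (·.2)
          = (bd.drop j).take (k - j) := PySem.List.map_snd_enumerate _ _
      rw [h3, hIH]
      norm_cast

-- membership in A's accumulated valid-index set
theorem mem_valid_foldl (base_len : Int) :
    ∀ (di : List Int) (s : PySem.Set Int) (v : Int),
      v ∈ di.foldl (fun s idx =>
          match normalize_index_py idx base_len with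
          | some w => PySem.Set.add s w
          | none => s) s
        ↔ v ∈ s ∨ ∃ i ∈ di, normalize_index_py i base_len = some v := by
  intro di
  induction di with
  | nil => intro s v; simp
  | cons i di ih =>
      intro s v
      simp only [List.foldl_cons]
      cases hni : normalize_index_py i base_len with
      | none =>
          rw [ih]
          constructor
          · rintro (h | ⟨i', hi', hv⟩)
            · exact Or.inl h
            · exact Or.inr ⟨i', by simp [hi'], hv⟩
          · rintro (h | ⟨i', hi', hv⟩)
            · exact Or.inl h
            · rcases List.mem_cons.mp hi' with rfl | hmem
              · rw [hni] at hv; exact absurd hv (by simp)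
              · exact Or.inr ⟨i', hmem, hv⟩
      | some w =>
          rw [ih]
          constructor
          · rintro (h | ⟨i', hi', hv⟩)
            · rcases (PySem.Set.mem_add _ _ _).mp h with h | rfl
              · exact Or.inl h
              · exact Or.inr ⟨i, by simp, hni⟩
            · exact Or.inr ⟨i', by simp [hi'], hv⟩
          · rintro (h | ⟨i', hi', hv⟩)
            · exact Or.inl ((PySem.Set.mem_add _ _ _).mpr (Or.inl h))
            · rcases List.mem_cons.mp hi' with rfl | hmem
              · rw [hni] at hv
                exact Or.inl ((PySem.Set.mem_add _ _ _).mpr (Or.inr (by injection hv with h'; exact h'.symm)))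
              · exact Or.inr ⟨i', hmem, hv⟩

theorem normalize_char (i n v : Int) (hn : 0 ≤ n) :
    normalize_index_py i n = some v
      ↔ ((-n ≤ i ∧ i < n) ∧ v = if i < 0 then i + n else i) := by
  unfold normalize_index_py
  split_ifs
  all_goals simp_all
  all_goals omega

-- ===== VERDICT (by name: the statement is the Claim_ definition above) =====
theorem delete_multiple_positions_py_spec : Claim_equal_delete_multiple_positions_py := by
  intro bd di _
  unfold Spec_delete_multiple_positions_py
  unfold delete_multiple_positions_py delete_multiple_positions_py_alt
  simp only []
  set n : Int := (bd.length : Int) with hn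
  have hn0 : 0 ≤ n := by positivity
  set vals : List Int := (di.filter (fun i => decide (-n ≤ i) && decide (i < n))).map
      (fun i => if i < 0 then i + n else i) with hvals
  set cuts : List Int := PySem.List.sorted (PySem.Set.ofList vals) (fun x => x) false with hcuts
  set valid : PySem.Set Int := di.foldl (fun s idx =>
      match normalize_index_py idx n with
      | some v => PySem.Set.add s v
      | none => s) PySem.Set.empty with hvalid
  -- membership agreement between valid and cuts
  have hmem : ∀ v : Int, v ∈ valid ↔ v ∈ cuts := by
    intro v
    rw [hvalid, mem_valid_foldl]
    rw [hcuts, PySem.List.mem_sorted, PySem.Set.mem_ofList, hvals]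
    simp only [List.mem_map, List.mem_filter, PySem.Set.empty, List.not_mem_nil, false_or]
    constructor
    · rintro ⟨i, hi, hv⟩
      rw [normalize_char i n v hn0] at hv
      exact ⟨i, ⟨hi, by simp [hv.1.1, hv.1.2]⟩, hv.2.symm⟩
    · rintro ⟨i, ⟨hi, hcond⟩, hv⟩
      simp only [Bool.and_eq_true, decide_eq_true_eq] at hcond
      exact ⟨i, hi, (normalize_char i n v hn0).mpr ⟨hcond, hv.symm⟩⟩
  -- A as a filter
  have hA : (PySem.List.enumerate bd 0).foldl (fun res p =>
        if valid.contains p.1 then res else res ++ [p.2]) []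
      = (PySem.List.enumerate bd 0).foldl (fun res p =>
        if !(valid.contains p.1) then res ++ [p.2] else res) [] := by
    apply PySem.List.foldl_congr_mem
    intro res p _
    rcases valid.contains p.1 <;> simp
  rw [hA]
  rw [PySem.List.foldl_append_if]
  -- B as the walk
  rw [pvWalk_fold]
  rw [List.nil_append]
  -- rewrite valid-membership to cuts-membership inside the filter
  have hfc : (PySem.List.enumerate bd 0).filter (fun p => !(valid.contains p.1))
      = (PySem.List.enumerate bd 0).filter (fun p => !(cuts.contains p.1)) := by
    apply List.filter_congr
    intro p _
    have : valid.contains p.1 = cuts.contains p.1 := by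
      rw [Bool.eq_iff_iff, PySem.Set.contains_iff, List.contains_iff_mem]
      exact hmem p.1
    rw [this]
  rw [hfc]
  -- cut points are strictly increasing and in range
  have hpair : cuts.Pairwise (· < ·) := by
    rw [hcuts]
    exact PySem.List.sorted_ofList_pairwise_lt vals
  have hbnd : ∀ c ∈ cuts, (0 : Int) ≤ c ∧ c < n := by
    intro c hc
    rw [hcuts, PySem.List.mem_sorted, PySem.Set.mem_ofList, hvals] at hc
    obtain ⟨i, hi, rfl⟩ := List.mem_map.mp hc
    have := (List.mem_filter.mp hi).2
    simp only [Bool.and_eq_true, decide_eq_true_eq] at this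
    split_ifs <;> omega
  have := pvWalk_eq cuts bd 0 hpair (by simpa using hbnd)
  simp only [Nat.cast_zero, List.drop_zero] at this
  have hneg : ((0 : Int) - 1) = (-1 : Int) := by norm_num
  rw [hneg] at this
  rw [← this, List.nil_append]
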